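-- pv_equiv track=rewrite | github.com/mdmake/yp_algorithm | sprint_3/task_E.py | countingSortAndSum
-- ===== SOURCE A (Python) =====
-- def countingSortAndSum(array, k):
--     counted_values = [0] * (max(array)+1)
--     for value in array:
--         counted_values[value] += 1
--
--     index = 0
--     summa = 0
--     for value in range(0, len(counted_values)):
--         for amount in range(1, counted_values[value]+1):
--             summa += value
--             if summa > k:
--                 return index
--             index += 1
--
--     return len(array)
-- ===== SOURCE B (Python) =====
-- def countingSortAndSum(array, k):
--     counted_values = [0] * (max(array) + 1)
--     for value in array:
--         counted_values[value] += 1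
--
--     index = 0
--     summa = 0
--     for value in range(len(counted_values)):
--         c = counted_values[value]
--         if c == 0:
--             continue
--         if value == 0:
--             if summa > k:
--                 return index
--             index += c
--         else:
--             j = (k - summa) // value + 1 if summa <= k else 1
--             if j <= c:
--                 return index + j - 1
--             index += c
--             summa += value * c
--
--     return len(array)
-- ===== Notes on version B (the rewrite author's own statement) =====
-- stated objective: alternative
-- what changed: B keeps the counting-array build but replaces the per-occurrence inner loop by closed-form floor-division arithmetic per distinct value, jumping straight to the first position where the running sum exceeds k; both remain dominated by the O(max+n) array passes, so no speed is claimed.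
import Mathlib
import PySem

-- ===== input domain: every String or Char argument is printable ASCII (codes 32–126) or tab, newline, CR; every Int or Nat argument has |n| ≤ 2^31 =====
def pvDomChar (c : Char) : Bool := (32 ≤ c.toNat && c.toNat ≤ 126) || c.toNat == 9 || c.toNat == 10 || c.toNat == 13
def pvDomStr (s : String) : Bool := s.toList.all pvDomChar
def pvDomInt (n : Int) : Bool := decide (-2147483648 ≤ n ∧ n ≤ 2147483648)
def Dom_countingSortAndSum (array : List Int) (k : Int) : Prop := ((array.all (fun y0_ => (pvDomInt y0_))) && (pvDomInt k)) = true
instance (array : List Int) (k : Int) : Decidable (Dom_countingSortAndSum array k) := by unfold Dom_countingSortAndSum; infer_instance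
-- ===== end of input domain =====

-- B keeps A's counting-array build but replaces the per-occurrence inner loop by
-- closed-form floor-division arithmetic per distinct value (objective: alternative).

-- ===== PORT A =====

-- counted_values = [0]*(max(array)+1); for value in array: counted_values[value] += 1
-- (on empty array Python's max raises; out-of-range negative value raises IndexError:
--  both are excluded by Pre_, the port falls through unchanged there)
def pvBuildCounts (array : List Int) : List Int :=
  let n : Int := (PySem.List.max? array (fun x => x)).getD (-1) + 1
  array.foldl (fun cv v => PySem.List.pySetD cv v (PySem.List.pyGetD cv v 0 + 1))
    (List.replicate n.toNat 0)

-- inner 'for amount in range(1, counted_values[value]+1)': fuel = count, early return = .error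
def pvInnerA (k value : Int) : Nat → Int → Int → Except Int (Int × Int)
  | 0, index, summa => .ok (index, summa)
  | n + 1, index, summa =>
    let summa' := summa + value
    if summa' > k then .error index
    else pvInnerA k value n (index + 1) summa'

-- outer 'for value in range(0, len(counted_values))'
def pvOuterA (k : Int) : List Int → Int → Int → Int → Except Int (Int × Int)
  | [], _, index, summa => .ok (index, summa)
  | c :: rest, value, index, summa =>
    match pvInnerA k value c.toNat index summa with
    | .error i => .error i
    | .ok (i, s) => pvOuterA k rest (value + 1) i s

def countingSortAndSum (array : List Int) (k : Int) : Int :=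
  match pvOuterA k (pvBuildCounts array) 0 0 0 with
  | .error i => i
  | .ok _ => (array.length : Int)

-- ===== PORT B =====

-- same counting-array build as A (pvBuildCounts), then one closed-form step per distinct value
def pvScanB (k : Int) : List Int → Int → Int → Int → Option Int
  | [], _, _, _ => none
  | c :: rest, value, index, summa =>
    if c = 0 then pvScanB k rest (value + 1) index summa
    else if value = 0 then
      if summa > k then some index
      else pvScanB k rest (value + 1) (index + c) summa
    else
      let j := if summa ≤ k then PySem.Int.floordiv (k - summa) value + 1 else 1
      if j ≤ c then some (index + j - 1)
      else pvScanB k rest (value + 1) (index + c) (summa + value * c)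

def countingSortAndSum_alt (array : List Int) (k : Int) : Int :=
  match pvScanB k (pvBuildCounts array) 0 0 0 with
  | some i => i
  | none => (array.length : Int)

-- ===== PRECONDITION & SPEC =====
-- Pre_ excludes exactly the inputs where Python A raises (B raises there too, with the
-- identical build passes): the empty array (ValueError from max) and arrays containing a
-- negative value v with v < -(max+1) (IndexError).
def Pre_countingSortAndSum (array : List Int) (k : Int) : Prop :=
  array ≠ [] ∧ ∀ v ∈ array, 0 ≤ v + (PySem.List.max? array (fun x => x)).getD 0 + 1
instance (array : List Int) (k : Int) : Decidable (Pre_countingSortAndSum array k) := by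
  unfold Pre_countingSortAndSum; infer_instance

def pvWitness_countingSortAndSum : List Int × Int := ([1, 2, 0, 2], 3)

def Spec_countingSortAndSum (array : List Int) (k : Int) (out : Int) : Prop := out = countingSortAndSum_alt array k
instance (array : List Int) (k : Int) (out : Int) : Decidable (Spec_countingSortAndSum array k out) := by unfold Spec_countingSortAndSum; infer_instance

-- ===== CLAIM (what is proved, stated in full; the proofs are below) =====
def Claim_equal_countingSortAndSum : Prop := ∀ (array : List Int) (k : Int), Dom_countingSortAndSum array k → Pre_countingSortAndSum array k → Spec_countingSortAndSum array k (countingSortAndSum array k)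

-- ===== LEMMAS AND PROOFS =====

theorem pvStep_nonneg (cv : List Int) (h : ∀ c ∈ cv, 0 ≤ c) (v : Int) :
    ∀ c ∈ PySem.List.pySetD cv v (PySem.List.pyGetD cv v 0 + 1), 0 ≤ c := by
  intro c hc
  unfold PySem.List.pySetD PySem.List.pySet? at hc
  cases hmatch : PySem.List.pyIdx? cv.length v with
  | none => rw [hmatch] at hc; simp at hc; exact h c hc
  | some i =>
    rw [hmatch] at hc
    simp only [Option.map_some, Option.getD_some] at hc
    rcases List.mem_or_eq_of_mem_set hc with h1 | h2
    · exact h c h1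
    · subst h2
      have : PySem.List.pyGetD cv v 0 ∈ cv ∨ PySem.List.pyGetD cv v 0 = 0 := by
        unfold PySem.List.pyGetD
        cases hg : PySem.List.pyGet? cv v with
        | none => right; rfl
        | some x => left; exact PySem.List.mem_of_pyGet?_eq_some (h := hg)
      rcases this with hm | hz
      · have := h _ hm; omega
      · omega

theorem pvFold_nonneg (array : List Int) (init : List Int) (h : ∀ c ∈ init, 0 ≤ c) :
    ∀ c ∈ array.foldl (fun cv v => PySem.List.pySetD cv v (PySem.List.pyGetD cv v 0 + 1)) init, 0 ≤ c := by
  induction array generalizing init with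
  | nil => exact h
  | cons a t ih => exact ih _ (pvStep_nonneg init h a)

theorem pvBuildCounts_nonneg (array : List Int) : ∀ c ∈ pvBuildCounts array, 0 ≤ c := by
  unfold pvBuildCounts
  apply pvFold_nonneg
  intro c hc
  rw [List.eq_of_mem_replicate hc]

theorem pvInnerA_zero (k : Int) (n : Nat) (index summa : Int) :
    pvInnerA k 0 n index summa =
      if summa > k ∧ n ≠ 0 then .error index else .ok (index + (n : Int), summa) := by
  induction n generalizing index with
  | zero => simp [pvInnerA]
  | succ m ih =>
    simp only [pvInnerA, add_zero]
    by_cases h : summa > k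
    · simp [h]
    · rw [if_neg h, ih]
      have hc1 : ¬(summa > k ∧ m ≠ 0) := by omega
      have hc2 : ¬(summa > k ∧ m + 1 ≠ 0) := by omega
      rw [if_neg hc1, if_neg hc2]
      simp only [Except.ok.injEq, Prod.mk.injEq]
      constructor
      · push_cast; ring
      · trivial

theorem pvInnerA_pos (k value : Int) (hv : 0 < value) (n : Nat) (index summa : Int) :
    pvInnerA k value n index summa =
      (let j := if summa ≤ k then PySem.Int.floordiv (k - summa) value + 1 else 1
       if j ≤ (n : Int) then .error (index + j - 1)
       else .ok (index + (n : Int), summa + value * (n : Int))) := by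
  induction n generalizing index summa with
  | zero =>
    simp only [Nat.cast_zero, mul_zero, add_zero]
    split
    · next hle =>
      have h0 : 0 ≤ PySem.Int.floordiv (k - summa) value := by
        rw [PySem.Int.floordiv_eq_ediv_of_pos hv]
        exact Int.ediv_nonneg (by omega) (by omega)
      rw [if_neg (by omega)]
      rfl
    · rw [if_neg (by omega)]
      rfl
  | succ m ih =>
    simp only [pvInnerA]
    by_cases hgt : summa + value > k
    · rw [if_pos hgt]
      have hj : (if summa ≤ k then PySem.Int.floordiv (k - summa) value + 1 else 1) = 1 := by
        by_cases hle : summa ≤ k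
        · rw [if_pos hle, PySem.Int.floordiv_eq_ediv_of_pos hv,
            Int.ediv_eq_zero_of_lt (by omega) (by omega)]
          norm_num
        · rw [if_neg hle]
      simp only [hj]
      rw [if_pos (by push_cast; omega)]
      norm_num
    · rw [if_neg hgt, ih]
      have hle : summa ≤ k := by omega
      have hle' : summa + value ≤ k := by omega
      simp only [if_pos hle, if_pos hle']
      have hshift : PySem.Int.floordiv (k - (summa + value)) value
          = PySem.Int.floordiv (k - summa) value - 1 := by
        rw [PySem.Int.floordiv_eq_ediv_of_pos hv, PySem.Int.floordiv_eq_ediv_of_pos hv]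
        have : k - (summa + value) = (k - summa) + (-1) * value := by ring
        rw [this, Int.add_mul_ediv_right _ _ (by omega)]
        omega
      rw [hshift]
      by_cases hcond : PySem.Int.floordiv (k - summa) value - 1 + 1 ≤ (m : Int)
      · rw [if_pos hcond, if_pos (by push_cast; omega)]
        congr 1; ring
      · rw [if_neg hcond, if_neg (by push_cast; omega)]
        simp only [Except.ok.injEq, Prod.mk.injEq]
        constructor <;> (push_cast; ring)

theorem pvScan_eq (k : Int) (cv : List Int) (hc : ∀ c ∈ cv, 0 ≤ c) :
    ∀ (value : Int), 0 ≤ value → ∀ (index summa : Int),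
      pvScanB k cv value index summa =
        (match pvOuterA k cv value index summa with
         | .error i => some i
         | .ok _ => none) := by
  induction cv with
  | nil => intro value _ index summa; rfl
  | cons c rest ih =>
    intro value hval index summa
    have hc0 : 0 ≤ c := hc c (by simp)
    have hrest : ∀ x ∈ rest, 0 ≤ x := fun x hx => hc x (by simp [hx])
    have ihr := ih hrest (value + 1) (by omega)
    simp only [pvScanB, pvOuterA]
    rcases eq_or_lt_of_le hval with hv0 | hvpos
    · -- value = 0
      rw [← hv0]
      by_cases hcz : c = 0
      · subst hcz
        rw [if_pos rfl]
        have hA : pvInnerA k 0 (Int.toNat 0) index summa = .ok (index, summa) := rfl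
        rw [hA]
        exact ih hrest (0 + 1) (by omega) index summa
      · rw [if_neg hcz]
        have hcpos : 0 < c := lt_of_le_of_ne hc0 (Ne.symm hcz)
        rw [if_pos rfl, pvInnerA_zero]
        by_cases hsk : summa > k
        · have hcc : summa > k ∧ c.toNat ≠ 0 := ⟨hsk, by omega⟩
          rw [if_pos hcc, if_pos hsk]
        · have hcc : ¬(summa > k ∧ c.toNat ≠ 0) := by omega
          rw [if_neg hcc, if_neg hsk]
          have hcast : index + ((c.toNat : Nat) : Int) = index + c := by omega
          rw [hcast]
          exact ih hrest (0 + 1) (by omega) (index + c) summa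
    · -- value > 0
      have hvne : ¬ value = 0 := by omega
      by_cases hcz : c = 0
      · subst hcz
        rw [if_pos rfl]
        have hA : pvInnerA k value (Int.toNat 0) index summa = .ok (index, summa) := rfl
        rw [hA]
        exact ih hrest (value + 1) (by omega) index summa
      · rw [if_neg hcz, if_neg hvne]
        have hcpos : 0 < c := lt_of_le_of_ne hc0 (Ne.symm hcz)
        rw [pvInnerA_pos k value hvpos]
        simp only []
        have hcast : ((c.toNat : Nat) : Int) = c := by omega
        rw [hcast]
        set j := if summa ≤ k then PySem.Int.floordiv (k - summa) value + 1 else 1 with hj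
        by_cases hjc : j ≤ c
        · rw [if_pos hjc, if_pos hjc]
        · rw [if_neg hjc, if_neg hjc]
          exact ih hrest (value + 1) (by omega) (index + c) (summa + value * c)

-- ===== VERDICT (by name: the statement is the Claim_ definition above) =====
theorem countingSortAndSum_spec : Claim_equal_countingSortAndSum := by
  intro array k _ _
  unfold Spec_countingSortAndSum countingSortAndSum countingSortAndSum_alt
  rw [pvScan_eq k (pvBuildCounts array) (pvBuildCounts_nonneg array) 0 le_rfl 0 0]
  cases pvOuterA k (pvBuildCounts array) 0 0 0 <;> rfl
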